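-- pv_equiv track=rewrite | github.com/johnvojtech/morph_analysis | analyzers/simple_analyzer.py | lemma_forms_split
-- ===== SOURCE A (Python) =====
-- def lemma_forms_split(lemma, forms, ls = None):
--     endings = set()
--     max_i = 0
--     min_j = len(lemma)
--     for form in forms:
--         index = max([(i, j) for i in range(len(lemma)) for j in range(i,len(lemma) + 1) if  lemma[i:j] in form], key = lambda x: x[1] - x[0])
--         endings.add(index[0])
--         endings.add(index[1])
--         if index[0] > max_i:
--             max_i = index[0]
--         if index[1] < min_j:
--             min_j = index[1]
--     indices = list(endings)
--     if 0 in indices: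
--         indices.remove(0)
--     indices.sort()
--     parts = []
--     last = 0
--     for index in indices:
--         if index <= max_i or index > min_j:
--             parts.append("E:" + lemma[last:index])
--         else:
--             parts.append(lemma[last:index])
--         last = index
--     if last < len(lemma):
--         parts.append("E:" + lemma[last:])
--     return parts
-- ===== SOURCE B (Python) =====
-- def _best_match(lemma, form):
--     # A common-substring length is feasible iff some window of that length occurs in
--     # form; feasibility is monotone (any substring of a common substring is common),
--     # so binary-search the maximal length, then take the smallest start index.
--     n = len(lemma)
--
--     def feasible(L):
--         return any(lemma[i:i + L] in form for i in range(n + 1 - L))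
--
--     lo, hi = 0, n
--     while lo < hi:
--         mid = (lo + hi + 1) // 2
--         if feasible(mid):
--             lo = mid
--         else:
--             hi = mid - 1
--     for i in range(n + 1 - lo):
--         if lemma[i:i + lo] in form:
--             return (i, i + lo)
--
--
-- def lemma_forms_split(lemma, forms, ls=None):
--     n = len(lemma)
--     pairs = [_best_match(lemma, form) for form in forms]
--     max_i = max((p[0] for p in pairs), default=0)
--     min_j = min((p[1] for p in pairs), default=n)
--     cuts = sorted({k for p in pairs for k in p} - {0})
--     parts = [("E:" + lemma[a:b]) if (b <= max_i or b > min_j) else lemma[a:b]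
--              for a, b in zip([0] + cuts, cuts)]
--     last = cuts[-1] if cuts else 0
--     if last < n:
--         parts.append("E:" + lemma[last:])
--     return parts
-- ===== Notes on version B (the rewrite author's own statement) =====
-- stated objective: faster
-- what changed: Per form, instead of materialising all O(n^2) (i,j) substring pairs and taking max by length, B binary-searches the maximal common-substring length (feasibility is monotone) and then takes the smallest start index; the parts list is built by zipping cut boundaries instead of a running last/append loop.
import Mathlib
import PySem

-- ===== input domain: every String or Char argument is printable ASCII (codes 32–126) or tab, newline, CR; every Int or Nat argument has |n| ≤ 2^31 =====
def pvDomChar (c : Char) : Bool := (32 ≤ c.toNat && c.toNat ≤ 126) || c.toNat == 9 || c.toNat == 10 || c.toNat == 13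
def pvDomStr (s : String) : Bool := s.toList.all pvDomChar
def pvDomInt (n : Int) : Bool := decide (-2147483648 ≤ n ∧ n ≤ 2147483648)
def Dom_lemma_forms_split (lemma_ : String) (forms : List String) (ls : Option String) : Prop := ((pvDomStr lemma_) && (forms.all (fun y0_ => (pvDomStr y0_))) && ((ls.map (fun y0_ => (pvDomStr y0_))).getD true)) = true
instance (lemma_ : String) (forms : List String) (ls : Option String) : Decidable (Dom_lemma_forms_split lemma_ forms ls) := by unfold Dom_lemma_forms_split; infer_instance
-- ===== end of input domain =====

-- B replaces A's per-form enumeration of all (i,j) substring pairs (max by length) by a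
-- binary search over the (monotone) feasible common-substring lengths followed by a scan
-- for the smallest start (measured faster), and assembles the parts by zipping cut
-- boundaries.  A mutates no argument; the equivalence is about the return value.

-- ===== PORT A =====
-- the comprehension [(i, j) for i in range(len(lemma)) for j in range(i, len(lemma)+1) if lemma[i:j] in form]
def pvCandA (lemma_ : String) (f : String) : List (Int × Int) :=
  (PySem.List.pyRange 0 (PySem.Str.len lemma_) 1).flatMap (fun i =>
    ((PySem.List.pyRange i (PySem.Str.len lemma_ + 1) 1).filter (fun j =>
      PySem.Str.isIn (PySem.Str.slice lemma_ (some i) (some j)) f)).map (fun j => (i, j)))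

-- the 'for form in forms' loop; none = Python's ValueError from max([]) (empty lemma)
def pvALoop (lemma_ : String) : List String → PySem.Set Int → Int → Int → Option (PySem.Set Int × Int × Int)
  | [], e, mi, mj => some (e, mi, mj)
  | f :: rest, e, mi, mj =>
    match PySem.List.max? (pvCandA lemma_ f) (fun x => x.2 - x.1) with
    | none => none
    | some idx =>
      pvALoop lemma_ rest ((e.add idx.1).add idx.2)
        (if idx.1 > mi then idx.1 else mi) (if idx.2 < mj then idx.2 else mj)

-- the code after the loop: indices list, sort, parts accumulation
def pvAFinish (lemma_ : String) (endings : PySem.Set Int) (max_i min_j : Int) : List String :=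
  let indices0 : List Int := endings
  let indices1 := if indices0.contains 0 then (PySem.List.remove? indices0 0).getD indices0 else indices0
  let indices := PySem.List.sorted indices1 (fun x => x) false
  let st := indices.foldl (fun (st : List String × Int) index =>
      (st.1 ++ [if index ≤ max_i ∨ index > min_j
                then "E:" ++ PySem.Str.slice lemma_ (some st.2) (some index)
                else PySem.Str.slice lemma_ (some st.2) (some index)], index)) ([], 0)
  if st.2 < PySem.Str.len lemma_ then st.1 ++ ["E:" ++ PySem.Str.slice lemma_ (some st.2) none] else st.1

def lemma_forms_split (lemma_ : String) (forms : List String) (ls : Option String) : List String :=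
  match pvALoop lemma_ forms PySem.Set.empty 0 (PySem.Str.len lemma_) with
  | none => []   -- unreachable under Pre_ (Python raises ValueError)
  | some st => pvAFinish lemma_ st.1 st.2.1 st.2.2

-- ===== PORT B =====
-- _best_match's feasible(L): any(lemma[i:i+L] in form for i in range(n + 1 - L))
def pvFeasible (lemma_ f : String) (L : Nat) : Bool :=
  (List.range (lemma_.toList.length + 1 - L)).any (fun (i : Nat) =>
    PySem.Str.isIn (PySem.Str.slice lemma_ (some (i : Int)) (some ((i : Int) + (L : Int)))) f)

-- the while-loop: binary search for the largest feasible window length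
def pvBSearch (lemma_ f : String) (lo hi : Nat) : Nat :=
  if lo < hi then
    let mid := (lo + hi + 1) / 2
    if pvFeasible lemma_ f mid then pvBSearch lemma_ f mid hi
    else pvBSearch lemma_ f lo (mid - 1)
  else lo
termination_by hi - lo
decreasing_by
  · omega
  · omega

-- the final loop: smallest start index of a feasible-length window
def pvBBest (lemma_ f : String) : Int × Int :=
  let L := pvBSearch lemma_ f 0 lemma_.toList.length
  match (List.range (lemma_.toList.length + 1 - L)).find? (fun (i : Nat) =>
      PySem.Str.isIn (PySem.Str.slice lemma_ (some (i : Int)) (some ((i : Int) + (L : Int)))) f) with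
  | some i => ((i : Int), (i : Int) + (L : Int))
  | none => (0, 0)   -- never reached: the searched length is always feasible

def lemma_forms_split_alt (lemma_ : String) (forms : List String) (ls : Option String) : List String :=
  let n := PySem.Str.len lemma_
  let pairs := forms.map (fun f => pvBBest lemma_ f)
  let max_i := PySem.List.maxD (pairs.map (fun p => p.1)) (fun x => x) 0
  let min_j := PySem.List.minD (pairs.map (fun p => p.2)) (fun x => x) n
  let cuts := PySem.List.sorted
      (PySem.Set.diff (PySem.Set.ofList (pairs.flatMap (fun p => [p.1, p.2]))) (PySem.Set.ofList [0]))
      (fun x => x) false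
  let parts := ((0 :: cuts).zip cuts).map (fun ab =>
      if ab.2 ≤ max_i ∨ ab.2 > min_j
      then "E:" ++ PySem.Str.slice lemma_ (some ab.1) (some ab.2)
      else PySem.Str.slice lemma_ (some ab.1) (some ab.2))
  let last := (cuts.getLast?).getD 0
  if last < n then parts ++ ["E:" ++ PySem.Str.slice lemma_ (some last) none] else parts

-- ===== PRECONDITION & SPEC =====
-- Pre_ excludes only the inputs where A raises: on an empty lemma with a non-empty forms
-- list, max([]) raises ValueError.
def Pre_lemma_forms_split (lemma_ : String) (forms : List String) (ls : Option String) : Prop :=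
  forms = [] ∨ lemma_ ≠ ""
instance (lemma_ : String) (forms : List String) (ls : Option String) : Decidable (Pre_lemma_forms_split lemma_ forms ls) := by unfold Pre_lemma_forms_split; infer_instance
def pvWitness_lemma_forms_split : String × List String × Option String := ("ab", ["abc"], none)

def Spec_lemma_forms_split (lemma_ : String) (forms : List String) (ls : Option String) (out : List String) : Prop := out = lemma_forms_split_alt lemma_ forms ls
instance (lemma_ : String) (forms : List String) (ls : Option String) (out : List String) : Decidable (Spec_lemma_forms_split lemma_ forms ls out) := by unfold Spec_lemma_forms_split; infer_instance

-- ===== CLAIM (what is proved, stated in full; the proofs are below) =====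
def Claim_equal_lemma_forms_split : Prop := ∀ (lemma_ : String) (forms : List String) (ls : Option String), Dom_lemma_forms_split lemma_ forms ls → Pre_lemma_forms_split lemma_ forms ls → Spec_lemma_forms_split lemma_ forms ls (lemma_forms_split lemma_ forms ls)

-- ===== LEMMAS AND PROOFS =====

-- `lemma[i:j] in form` for natural i, j
def pvValid (lemma_ f : String) (i j : Nat) : Bool :=
  PySem.Str.isIn (PySem.Str.slice lemma_ (some (i : Int)) (some (j : Int))) f

-- range(a, b) for natural bounds
theorem pv_pyRange_one_nat (a b : Nat) :
    PySem.List.pyRange (a : Int) (b : Int) 1 = (List.range (b - a)).map (fun (k : Nat) => ((a : Int) + (k : Int))) := by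
  rw [PySem.List.pyRange_of_pos _ _ (by norm_num : (0:Int) < 1)]
  have hc : (if (a:Int) < (b:Int) then (((b:Int) - (a:Int) + 1 - 1) / 1).toNat else 0) = b - a := by
    have h2 : ((b:Int) - (a:Int) + 1 - 1) / 1 = (b:Int) - (a:Int) := by norm_num
    rw [h2]; split_ifs with h <;> omega
  rw [hc]
  exact List.map_congr_left (fun k _ => by ring)

-- max? keeps the FIRST element of maximal key
theorem pv_foldl_max_const {α : Type} (key : α → Int) (xs : List α) (m : α)
    (h : ∀ y ∈ xs, key y ≤ key m) :
    xs.foldl (fun acc x => match acc with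
      | none => some x
      | some w => if key w < key x then some x else some w) (some m) = some m := by
  induction xs with
  | nil => rfl
  | cons x xs ih =>
    have hx : ¬ key m < key x := by have := h x (by simp); omega
    simp only [List.foldl_cons]
    rw [if_neg hx]
    exact ih (fun y hy => h y (by simp [hy]))

theorem pv_max?_first {α : Type} (key : α → Int) (pre post : List α) (m : α)
    (hpre : ∀ y ∈ pre, key y < key m) (hpost : ∀ y ∈ post, key y ≤ key m) :
    PySem.List.max? (pre ++ m :: post) key = some m := by
  show (pre ++ m :: post).foldl (fun acc x => match acc with
      | none => some x
      | some w => if key w < key x then some x else some w) none = some m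
  rw [List.foldl_append]
  cases hmp : pre.foldl (fun acc x => match acc with
      | none => some x
      | some w => if key w < key x then some x else some w) none with
  | none =>
    have hpe : pre = [] := (PySem.List.max?_eq_none_iff pre key).mp hmp
    subst hpe
    simp only [List.foldl_cons]
    exact pv_foldl_max_const key post m hpost
  | some y =>
    have hy : y ∈ pre := PySem.List.max?_mem (hmp : PySem.List.max? pre key = some y)
    have hym : key y < key m := hpre y hy
    simp only [List.foldl_cons]
    show List.foldl _ (if key y < key m then some m else some y) post = some m
    rw [if_pos hym]
    exact pv_foldl_max_const key post m hpost

-- the comprehension in natural-number form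
theorem pv_candA_eq (lemma_ f : String) :
    pvCandA lemma_ f =
      (List.range lemma_.toList.length).flatMap (fun i =>
        ((List.range (lemma_.toList.length + 1 - i)).filter (fun t => pvValid lemma_ f i (i + t))).map
          (fun (t : Nat) => ((i : Int), (i : Int) + (t : Int)))) := by
  have h0 : PySem.Str.len lemma_ = ((lemma_.toList.length : Nat) : Int) := rfl
  unfold pvCandA
  rw [h0]
  have h1 : PySem.List.pyRange 0 ((lemma_.toList.length : Nat) : Int) 1
      = (List.range lemma_.toList.length).map (fun (k : Nat) => ((k : Int))) := by
    have h := pv_pyRange_one_nat 0 lemma_.toList.length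
    simpa using h
  rw [h1, List.flatMap_map]
  apply List.flatMap_congr
  intro i _
  have h2 : ((lemma_.toList.length : Nat) : Int) + 1 = (((lemma_.toList.length + 1 : Nat)) : Int) := by push_cast; ring
  rw [h2, pv_pyRange_one_nat i (lemma_.toList.length + 1), List.filter_map, List.map_map]
  have h3 : ∀ (t : Nat), ((fun j => PySem.Str.isIn (PySem.Str.slice lemma_ (some (i:Int)) (some j)) f) ∘
      (fun (k : Nat) => ((i : Int) + (k : Int)))) t = pvValid lemma_ f i (i + t) := by
    intro t
    simp only [Function.comp, pvValid, Nat.cast_add]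
  rw [List.filter_congr (fun t _ => h3 t)]
  exact List.map_congr_left (fun t _ => by simp [Function.comp])

theorem pv_valid_refl (lemma_ f : String) (i : Nat) : pvValid lemma_ f i (i + 0) = true := by
  have h : PySem.List.slice lemma_.toList (some (i : Int)) (some (i : Int)) = ([] : List Char) := by
    rw [PySem.List.slice_natCast]; simp
  simp [pvValid, PySem.Str.isIn, PySem.Str.slice, PySem.Chars.slice_eq_listSlice, h,
    PySem.Chars.isIn_nil]

-- any substring of a common substring is common: pvValid is monotone in the length
theorem pv_slice_toList (lemma_ : String) (i M : Nat) :
    (PySem.Str.slice lemma_ (some (i : Int)) (some ((i : Int) + (M : Int)))).toList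
      = List.take M (List.drop i lemma_.toList) := by
  simp only [PySem.Str.slice, String.toList_ofList, PySem.Chars.slice_eq_listSlice]
  rw [show ((i : Int) + (M : Int)) = (((i + M : Nat)) : Int) by push_cast; ring]
  rw [PySem.List.slice_natCast]
  congr 1
  omega

theorem pv_valid_mono (lemma_ f : String) (i L' L : Nat) (h : L' ≤ L)
    (hv : pvValid lemma_ f i (i + L) = true) : pvValid lemma_ f i (i + L') = true := by
  unfold pvValid at hv ⊢
  rw [PySem.Str.isIn_iff_infix] at hv ⊢
  have e1 : ((i : Int) + (L : Int)) = (((i + L : Nat)) : Int) := by push_cast; ring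
  have e2 : ((i : Int) + (L' : Int)) = (((i + L' : Nat)) : Int) := by push_cast; ring
  rw [← e1] at hv
  rw [← e2]
  rw [pv_slice_toList] at hv
  rw [pv_slice_toList]
  have hpref : (List.take L' (List.drop i lemma_.toList)) <+: (List.take L (List.drop i lemma_.toList)) := by
    have hp := List.take_prefix L' (List.take L (List.drop i lemma_.toList))
    rwa [List.take_take, Nat.min_eq_left h] at hp
  exact List.IsInfix.trans hpref.isInfix hv

theorem pv_feasible_iff (lemma_ f : String) (L : Nat) (hL : L ≤ lemma_.toList.length) :
    pvFeasible lemma_ f L = true ↔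
      ∃ i, i + L ≤ lemma_.toList.length ∧ pvValid lemma_ f i (i + L) = true := by
  unfold pvFeasible
  rw [List.any_eq_true]
  constructor
  · rintro ⟨i, hi, hp⟩
    exact ⟨i, by have := List.mem_range.mp hi; omega, by simpa [pvValid, Nat.cast_add] using hp⟩
  · rintro ⟨i, hi, hv⟩
    exact ⟨i, List.mem_range.mpr (by omega), by simpa [pvValid, Nat.cast_add] using hv⟩

theorem pv_feasible_zero (lemma_ f : String) : pvFeasible lemma_ f 0 = true := by
  rw [pv_feasible_iff lemma_ f 0 (Nat.zero_le _)]
  exact ⟨0, by omega, pv_valid_refl lemma_ f 0⟩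

theorem pv_feasible_mono (lemma_ f : String) (L' L : Nat) (h : L' ≤ L)
    (hL : L ≤ lemma_.toList.length) (hf : pvFeasible lemma_ f L = true) :
    pvFeasible lemma_ f L' = true := by
  rw [pv_feasible_iff lemma_ f L hL] at hf
  rw [pv_feasible_iff lemma_ f L' (le_trans h hL)]
  rcases hf with ⟨i, hi, hv⟩
  exact ⟨i, by omega, pv_valid_mono lemma_ f i L' L h hv⟩

-- the binary search returns the largest feasible length
theorem pvBSearch_spec (lemma_ f : String) : ∀ (d lo hi : Nat), hi - lo ≤ d → lo ≤ hi →
    hi ≤ lemma_.toList.length → pvFeasible lemma_ f lo = true →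
    (∀ L, L ≤ lemma_.toList.length → pvFeasible lemma_ f L = true → L ≤ hi) →
    pvBSearch lemma_ f lo hi ≤ lemma_.toList.length ∧
      pvFeasible lemma_ f (pvBSearch lemma_ f lo hi) = true ∧
      (∀ L, L ≤ lemma_.toList.length → pvFeasible lemma_ f L = true → L ≤ pvBSearch lemma_ f lo hi) := by
  intro d
  induction d with
  | zero =>
    intro lo hi hd hlh hhn hflo hbound
    have : ¬ lo < hi := by omega
    rw [pvBSearch, if_neg this]
    exact ⟨by omega, hflo, fun L hL hf => by have := hbound L hL hf; omega⟩
  | succ d ih =>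
    intro lo hi hd hlh hhn hflo hbound
    by_cases hlt : lo < hi
    · rw [pvBSearch, if_pos hlt]
      have hmid1 : lo < (lo + hi + 1) / 2 := by omega
      have hmid2 : (lo + hi + 1) / 2 ≤ hi := by omega
      by_cases hf : pvFeasible lemma_ f ((lo + hi + 1) / 2) = true
      · rw [if_pos hf]
        exact ih ((lo + hi + 1) / 2) hi (by omega) (by omega) hhn hf hbound
      · rw [if_neg hf]
        refine ih lo ((lo + hi + 1) / 2 - 1) (by omega) ?_ (by omega) hflo ?_
        · by_contra hc
          have hle : (lo + hi + 1) / 2 ≤ lo := by omega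
          omega
        · intro L hL hfL
          by_contra hc
          exact hf (pv_feasible_mono lemma_ f ((lo + hi + 1) / 2) L (by omega) hL hfL)
    · rw [pvBSearch, if_neg hlt]
      exact ⟨by omega, hflo, fun L hL hf => by have := hbound L hL hf; omega⟩

-- full specification of B's per-form result
theorem pvBBest_spec (lemma_ f : String) :
    ∃ i0 L0 : Nat,
      pvBBest lemma_ f = ((i0 : Int), (i0 : Int) + (L0 : Int)) ∧
      L0 ≤ lemma_.toList.length ∧ i0 + L0 ≤ lemma_.toList.length ∧ (L0 = 0 → i0 = 0) ∧
      pvValid lemma_ f i0 (i0 + L0) = true ∧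
      (∀ L' i, L' ≤ lemma_.toList.length → i + L' ≤ lemma_.toList.length →
        pvValid lemma_ f i (i + L') = true → L' ≤ L0) ∧
      (∀ i, i + L0 ≤ lemma_.toList.length → pvValid lemma_ f i (i + L0) = true → i0 ≤ i) := by
  obtain ⟨hLn, hLf, hLmax⟩ := pvBSearch_spec lemma_ f lemma_.toList.length 0 lemma_.toList.length
    (by omega) (Nat.zero_le _) (le_refl _) (pv_feasible_zero lemma_ f) (fun L hL _ => hL)
  set L0 := pvBSearch lemma_ f 0 lemma_.toList.length with hL0d
  cases hfind : (List.range (lemma_.toList.length + 1 - L0)).find?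
      (fun (i : Nat) => PySem.Str.isIn (PySem.Str.slice lemma_ (some (i : Int))
        (some ((i : Int) + (L0 : Int)))) f) with
  | none =>
    exfalso
    rcases (pv_feasible_iff lemma_ f _ hLn).mp hLf with ⟨i, hi, hv⟩
    have := List.find?_eq_none.mp hfind i (List.mem_range.mpr (by omega))
    exact this (by simpa [pvValid, Nat.cast_add] using hv)
  | some i =>
    obtain ⟨hp, idx, hidx, heq, hbefore⟩ := List.find?_eq_some_iff_getElem.mp hfind
    have hm : idx < lemma_.toList.length + 1 - L0 := by simpa using hidx
    have hie : i = idx := by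
      have h := heq; rw [List.getElem_range] at h; omega
    refine ⟨i, L0, ?_, hLn, by omega, ?_, ?_, ?_, ?_⟩
    · show pvBBest lemma_ f = _
      have hub : pvBBest lemma_ f = (match (List.range (lemma_.toList.length + 1 - L0)).find?
          (fun (i : Nat) => PySem.Str.isIn (PySem.Str.slice lemma_ (some (i : Int))
            (some ((i : Int) + (L0 : Int)))) f) with
        | some i => ((i : Int), (i : Int) + (L0 : Int))
        | none => ((0 : Int), (0 : Int))) := rfl
      rw [hub, hfind]
    · -- a feasible length 0 is matched first at i = 0
      intro hL0z
      by_contra hi0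
      have h0 : 0 < idx := by omega
      have hfalse := hbefore 0 h0
      rw [List.getElem_range] at hfalse
      rw [hL0z] at hfalse
      simp only [Bool.not_eq_true'] at hfalse
      rw [show ((0 : Nat) : Int) + ((0 : Nat) : Int) = (((0 + 0 : Nat)) : Int) by norm_num] at hfalse
      have hvr := pv_valid_refl lemma_ f 0
      simp only [pvValid] at hvr
      rw [hvr] at hfalse
      cases hfalse
    · simpa [pvValid, Nat.cast_add] using hp
    · intro L' k hL' hk hvk
      exact hLmax L' hL' ((pv_feasible_iff lemma_ f L' hL').mpr ⟨k, hk, hvk⟩)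
    · intro k hk hvk
      by_contra hki
      have hklt : k < idx := by omega
      have hfalse := hbefore k hklt
      rw [List.getElem_range] at hfalse
      have hne : ¬ pvValid lemma_ f k (k + L0) = true := by
        simpa [pvValid, Nat.cast_add] using hfalse
      exact hne hvk

theorem pv_pairwise_flatMap {α β : Type} (R : β → β → Prop) (F : α → List β) (l : List α)
    (S : α → α → Prop) (hl : l.Pairwise S) (hF : ∀ a, (F a).Pairwise R)
    (hcross : ∀ a b, S a b → ∀ x ∈ F a, ∀ y ∈ F b, R x y) :
    (l.flatMap F).Pairwise R := by
  induction l with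
  | nil => simp
  | cons a l ih =>
    rw [List.flatMap_cons, List.pairwise_append]
    rcases List.pairwise_cons.mp hl with ⟨ha, hl'⟩
    refine ⟨hF a, ih hl', ?_⟩
    intro x hx y hy
    rcases List.mem_flatMap.mp hy with ⟨b, hb, hyb⟩
    exact hcross a b (ha b hb) x hx y hyb

-- the pairs of the comprehension appear in lexicographic order
theorem pv_cand_sorted (lemma_ f : String) :
    ((List.range lemma_.toList.length).flatMap (fun i =>
        ((List.range (lemma_.toList.length + 1 - i)).filter (fun t => pvValid lemma_ f i (i + t))).map
          (fun (t : Nat) => ((i : Int), (i : Int) + (t : Int))))).Pairwise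
      (fun p q : Int × Int => p.1 < q.1 ∨ (p.1 = q.1 ∧ p.2 < q.2)) := by
  apply pv_pairwise_flatMap _ _ _ (· < ·) List.pairwise_lt_range
  · intro i
    rw [List.pairwise_map]
    apply List.Pairwise.sublist List.filter_sublist
    apply List.Pairwise.imp _ (List.pairwise_lt_range)
    intro t t' htt'
    right
    exact ⟨rfl, by omega⟩
  · intro a b hab x hx y hy
    rcases List.mem_map.mp hx with ⟨t, _, rfl⟩
    rcases List.mem_map.mp hy with ⟨u, _, rfl⟩
    left
    exact Nat.cast_lt.mpr hab

-- membership in the comprehension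
theorem pv_cand_mem (lemma_ f : String) (y : Int × Int) :
    y ∈ ((List.range lemma_.toList.length).flatMap (fun i =>
        ((List.range (lemma_.toList.length + 1 - i)).filter (fun t => pvValid lemma_ f i (i + t))).map
          (fun (t : Nat) => ((i : Int), (i : Int) + (t : Int))))) ↔
      ∃ i t : Nat, i < lemma_.toList.length ∧ t < lemma_.toList.length + 1 - i ∧
        pvValid lemma_ f i (i + t) = true ∧ y = ((i : Int), (i : Int) + (t : Int)) := by
  simp only [List.mem_flatMap, List.mem_map, List.mem_filter, List.mem_range]
  constructor
  · rintro ⟨i, hi, t, ⟨ht, hvt⟩, rfl⟩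
    exact ⟨i, t, hi, ht, hvt, rfl⟩
  · rintro ⟨i, t, hi, ht, hvt, rfl⟩
    exact ⟨i, hi, t, ⟨ht, hvt⟩, rfl⟩

-- the key per-form fact: A's max over all pairs is exactly B's scan result
theorem pv_main (lemma_ f : String) (hne : lemma_ ≠ "") :
    PySem.List.max? (pvCandA lemma_ f) (fun x => x.2 - x.1) = some (pvBBest lemma_ f) := by
  have hn : 1 ≤ lemma_.toList.length := by
    have : lemma_.toList ≠ [] := fun hh => hne (String.toList_eq_nil_iff.mp hh)
    cases h : lemma_.toList with
    | nil => exact absurd h this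
    | cons c cs => simp [h]
  obtain ⟨i0, L0, hr, hL0, hbound, hz, hv, hmax, hmin⟩ := pvBBest_spec lemma_ f
  have hi0 : i0 < lemma_.toList.length := by
    rcases Nat.eq_zero_or_pos L0 with h0 | h0
    · have := hz h0; omega
    · omega
  have hmem : ((i0 : Int), (i0 : Int) + (L0 : Int)) ∈
      ((List.range lemma_.toList.length).flatMap (fun i =>
        ((List.range (lemma_.toList.length + 1 - i)).filter (fun t => pvValid lemma_ f i (i + t))).map
          (fun (t : Nat) => ((i : Int), (i : Int) + (t : Int))))) := by
    rw [pv_cand_mem]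
    exact ⟨i0, L0, hi0, by omega, hv, rfl⟩
  obtain ⟨pre, post, hsplit⟩ := List.append_of_mem hmem
  have hsorted := pv_cand_sorted lemma_ f
  rw [hsplit] at hsorted
  rcases List.pairwise_append.mp hsorted with ⟨_, _, hcross⟩
  rw [pv_candA_eq, hsplit, hr]
  apply pv_max?_first
  · -- every earlier pair is strictly shorter
    intro y hy
    have hyx : y ∈ ((List.range lemma_.toList.length).flatMap (fun i =>
        ((List.range (lemma_.toList.length + 1 - i)).filter (fun t => pvValid lemma_ f i (i + t))).map
          (fun (t : Nat) => ((i : Int), (i : Int) + (t : Int))))) := by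
      rw [hsplit]; exact List.mem_append.mpr (Or.inl hy)
    rcases (pv_cand_mem lemma_ f y).mp hyx with ⟨i, t, hi, ht, hvt, rfl⟩
    have hkey : ((i : Int), (i : Int) + (t : Int)).2 - ((i : Int), (i : Int) + (t : Int)).1 = (t : Int) := by
      simp
    have htL0 : t ≤ L0 := hmax t i (by omega) (by omega) hvt
    have hR := hcross _ hy _ (List.mem_cons_self)
    rcases hR with hlt | ⟨heq, hlt⟩
    · -- i < i0 : t = L0 impossible by minimality
      have hiI : i < i0 := Nat.cast_lt.mp hlt
      have : t ≠ L0 := by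
        intro hteq; subst hteq
        exact absurd (hmin i (by omega) hvt) (by omega)
      simp only [hkey]
      have : t < L0 := by omega
      have h2 : ((i0 : Int), (i0 : Int) + (L0 : Int)).2 - ((i0 : Int), (i0 : Int) + (L0 : Int)).1 = (L0 : Int) := by simp
      rw [h2]
      exact_mod_cast this
    · -- same start, then the second component is strictly smaller
      have hiI : i = i0 := Nat.cast_inj.mp heq
      have h2 : (i : Int) + (t : Int) < (i0 : Int) + (L0 : Int) := hlt
      simp only [hkey]
      show (t : Int) < ((i0 : Int) + (L0 : Int)) - (i0 : Int)
      omega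
  · intro y hy
    have hyx : y ∈ ((List.range lemma_.toList.length).flatMap (fun i =>
        ((List.range (lemma_.toList.length + 1 - i)).filter (fun t => pvValid lemma_ f i (i + t))).map
          (fun (t : Nat) => ((i : Int), (i : Int) + (t : Int))))) := by
      rw [hsplit]
      exact List.mem_append.mpr (Or.inr (List.mem_cons_of_mem _ hy))
    rcases (pv_cand_mem lemma_ f y).mp hyx with ⟨i, t, hi, ht, hvt, rfl⟩
    have htL0 : t ≤ L0 := hmax t i (by omega) (by omega) hvt
    simp only
    omega

-- A's loop over forms, expressed as a fold over B's per-form results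
theorem pvALoop_eq (lemma_ : String) (hne : lemma_ ≠ "") (forms : List String) :
    ∀ (e : PySem.Set Int) (mi mj : Int),
    pvALoop lemma_ forms e mi mj =
      some ((forms.map (fun f => pvBBest lemma_ f)).foldl
        (fun st p => ((st.1.add p.1).add p.2,
          (if p.1 > st.2.1 then p.1 else st.2.1), (if p.2 < st.2.2 then p.2 else st.2.2)))
        (e, mi, mj)) := by
  induction forms with
  | nil => intro e mi mj; rfl
  | cons f rest ih =>
    intro e mi mj
    show (match PySem.List.max? (pvCandA lemma_ f) (fun x => x.2 - x.1) with
      | none => none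
      | some idx => pvALoop lemma_ rest ((e.add idx.1).add idx.2)
          (if idx.1 > mi then idx.1 else mi) (if idx.2 < mj then idx.2 else mj)) = _
    rw [pv_main lemma_ f hne]
    simp only [List.map_cons, List.foldl_cons]
    exact ih _ _ _

theorem pv_endings_eq (pairs : List (Int × Int)) : ∀ (s : PySem.Set Int),
    pairs.foldl (fun e p => (e.add p.1).add p.2) s =
      PySem.Set.update s (pairs.flatMap (fun p => [p.1, p.2])) := by
  induction pairs with
  | nil => intro s; rfl
  | cons p rest ih =>
    intro s
    show rest.foldl _ ((s.add p.1).add p.2) = _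
    rw [ih ((s.add p.1).add p.2)]
    rfl

theorem pv_max?_cons_run (xs : List Int) : ∀ (a : Int),
    PySem.List.max? (a :: xs) (fun x => x) = some (xs.foldl (fun m x => if x > m then x else m) a) := by
  induction xs with
  | nil => intro a; rfl
  | cons x xs ih =>
    intro a
    simp only [PySem.List.max?, List.foldl_cons] at ih ⊢
    by_cases h : a < x
    · rw [if_pos h, if_pos (show x > a from h)]; exact ih x
    · rw [if_neg h, if_neg (show ¬ x > a from h)]; exact ih a

theorem pv_maxD_run (xs : List Int) (h : ∀ x ∈ xs, 0 ≤ x) :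
    xs.foldl (fun m x => if x > m then x else m) 0 = PySem.List.maxD xs (fun x => x) 0 := by
  cases xs with
  | nil => rfl
  | cons x rest =>
    have hx0 : 0 ≤ x := h x (by simp)
    have hx : (if x > (0:Int) then x else 0) = x := by
      by_cases hh : x > 0
      · rw [if_pos hh]
      · rw [if_neg hh]; omega
    show List.foldl _ (if x > (0:Int) then x else 0) rest = _
    rw [hx]
    show _ = (PySem.List.max? (x :: rest) (fun x => x)).getD 0
    rw [pv_max?_cons_run rest x]
    rfl

theorem pv_min?_cons_run (xs : List Int) : ∀ (a : Int),
    PySem.List.min? (a :: xs) (fun x => x) = some (xs.foldl (fun m x => if x < m then x else m) a) := by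
  induction xs with
  | nil => intro a; rfl
  | cons x xs ih =>
    intro a
    simp only [PySem.List.min?, List.foldl_cons] at ih ⊢
    by_cases h : x < a
    · rw [if_pos h, if_pos h]; exact ih x
    · rw [if_neg h, if_neg h]; exact ih a

theorem pv_minD_run (xs : List Int) (d : Int) (h : ∀ x ∈ xs, x ≤ d) :
    xs.foldl (fun m x => if x < m then x else m) d = PySem.List.minD xs (fun x => x) d := by
  cases xs with
  | nil => rfl
  | cons x rest =>
    have hx0 : x ≤ d := h x (by simp)
    have hx : (if x < d then x else d) = x := by
      by_cases hh : x < d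
      · rw [if_pos hh]
      · rw [if_neg hh]; omega
    show List.foldl _ (if x < d then x else d) rest = _
    rw [hx]
    show _ = (PySem.List.min? (x :: rest) (fun x => x)).getD d
    rw [pv_min?_cons_run rest x]
    rfl

-- removing 0 from a duplicate-free list is set difference with {0}
theorem pv_remove0 (E : List Int) (hnd : E.Nodup) :
    (if E.contains (0:Int) then (PySem.List.remove? E 0).getD E else E)
      = PySem.Set.diff E (PySem.Set.ofList [0]) := by
  have hdiff : PySem.Set.diff E (PySem.Set.ofList [0]) = E.filter (fun x => !(x == 0)) := by
    show E.filter _ = E.filter _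
    apply List.filter_congr
    intro x _
    show (!(x == 0 || false)) = !(x == 0)
    simp
  split_ifs with h0
  · have h0' : (0:Int) ∈ E := by simpa using h0
    rw [PySem.List.remove?_eq_some_erase E 0 h0']
    show E.erase 0 = _
    rw [List.Nodup.erase_eq_filter hnd, hdiff]
    rfl
  · rw [hdiff]
    symm
    apply List.filter_eq_self.mpr
    intro x hx
    have hxne : x ≠ 0 := by rintro rfl; exact h0 (by simpa)
    simpa using hxne

theorem pv_getLastD (ds : List Int) : ∀ (d x y : Int),
    ((d :: ds).getLast?).getD x = ((d :: ds).getLast?).getD y := by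
  induction ds with
  | nil => intro d x y; rfl
  | cons e es ih => intro d x y; rw [List.getLast?_cons_cons]; exact ih e x y

theorem pv_parts_zip (mk : Int → Int → String) (cs : List Int) : ∀ (ps : List String) (a0 : Int),
    cs.foldl (fun (st : List String × Int) c => (st.1 ++ [mk st.2 c], c)) (ps, a0) =
      (ps ++ ((a0 :: cs).zip cs).map (fun ab => mk ab.1 ab.2), (cs.getLast?).getD a0) := by
  induction cs with
  | nil => intro ps a0; simp
  | cons c cs ih =>
    intro ps a0
    simp only [List.foldl_cons]
    rw [ih]
    cases cs with
    | nil => simp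
    | cons d ds =>
      rw [List.getLast?_cons_cons, pv_getLastD ds d c a0]
      simp [List.zip_cons_cons]

-- ===== VERDICT (by name: the statement is the Claim_ definition above) =====
theorem lemma_forms_split_spec : Claim_equal_lemma_forms_split := by
  intro lemma_ forms ls _ hpre
  show lemma_forms_split lemma_ forms ls = lemma_forms_split_alt lemma_ forms ls
  have hloop : pvALoop lemma_ forms PySem.Set.empty 0 (PySem.Str.len lemma_) =
      some ((forms.map (fun f => pvBBest lemma_ f)).foldl
        (fun st p => ((st.1.add p.1).add p.2,
          (if p.1 > st.2.1 then p.1 else st.2.1), (if p.2 < st.2.2 then p.2 else st.2.2)))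
        (PySem.Set.empty, 0, PySem.Str.len lemma_)) := by
    rcases hpre with h | h
    · subst h; rfl
    · exact pvALoop_eq lemma_ h forms _ _ _
  have hpb : ∀ p ∈ forms.map (fun f => pvBBest lemma_ f), 0 ≤ p.1 ∧ p.2 ≤ PySem.Str.len lemma_ := by
    intro p hp
    rcases List.mem_map.mp hp with ⟨f, _, rfl⟩
    obtain ⟨i0, L0, hr, _, hbound, _, _, _, _⟩ := pvBBest_spec lemma_ f
    rw [hr]
    refine ⟨by positivity, ?_⟩
    show (i0 : Int) + (L0 : Int) ≤ ((lemma_.toList.length : Nat) : Int)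
    omega
  unfold lemma_forms_split
  rw [hloop]
  rw [PySem.List.foldl_prod_mk
      (f := fun (e : PySem.Set Int) (p : Int × Int) => (e.add p.1).add p.2)
      (g := fun (m : Int × Int) (p : Int × Int) =>
        ((if p.1 > m.1 then p.1 else m.1), (if p.2 < m.2 then p.2 else m.2)))]
  rw [PySem.List.foldl_prod_mk
      (f := fun (m : Int) (p : Int × Int) => if p.1 > m then p.1 else m)
      (g := fun (m : Int) (p : Int × Int) => if p.2 < m then p.2 else m)]
  show pvAFinish lemma_
      ((forms.map (fun f => pvBBest lemma_ f)).foldl (fun e p => (e.add p.1).add p.2) PySem.Set.empty)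
      ((forms.map (fun f => pvBBest lemma_ f)).foldl (fun m p => if p.1 > m then p.1 else m) 0)
      ((forms.map (fun f => pvBBest lemma_ f)).foldl (fun m p => if p.2 < m then p.2 else m) (PySem.Str.len lemma_))
    = lemma_forms_split_alt lemma_ forms ls
  have hE : (forms.map (fun f => pvBBest lemma_ f)).foldl (fun e p => (e.add p.1).add p.2) PySem.Set.empty
      = PySem.Set.ofList ((forms.map (fun f => pvBBest lemma_ f)).flatMap (fun p => [p.1, p.2])) := by
    rw [pv_endings_eq]
    exact PySem.Set.update_empty _
  have hMI : (forms.map (fun f => pvBBest lemma_ f)).foldl (fun m p => if p.1 > m then p.1 else m) 0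
      = PySem.List.maxD ((forms.map (fun f => pvBBest lemma_ f)).map (fun p => p.1)) (fun x => x) 0 := by
    rw [← pv_maxD_run _ (by
      intro x hx
      rcases List.mem_map.mp hx with ⟨p, hp, rfl⟩
      exact (hpb p hp).1)]
    simp only [List.foldl_map]
  have hMJ : (forms.map (fun f => pvBBest lemma_ f)).foldl (fun m p => if p.2 < m then p.2 else m) (PySem.Str.len lemma_)
      = PySem.List.minD ((forms.map (fun f => pvBBest lemma_ f)).map (fun p => p.2)) (fun x => x) (PySem.Str.len lemma_) := by
    rw [← pv_minD_run _ _ (by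
      intro x hx
      rcases List.mem_map.mp hx with ⟨p, hp, rfl⟩
      exact (hpb p hp).2)]
    simp only [List.foldl_map]
  rw [hE, hMI, hMJ]
  simp only [pvAFinish, lemma_forms_split_alt]
  set prs := forms.map (fun f => pvBBest lemma_ f) with hprs
  set E := PySem.Set.ofList (prs.flatMap (fun p => [p.1, p.2])) with hEd
  set MI := PySem.List.maxD (prs.map (fun p => p.1)) (fun x => x) 0 with hMId
  set MJ := PySem.List.minD (prs.map (fun p => p.2)) (fun x => x) (PySem.Str.len lemma_) with hMJd
  rw [pv_remove0 E (by rw [hEd]; exact PySem.Set.nodup_ofList _)]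
  set cuts := PySem.List.sorted (PySem.Set.diff E (PySem.Set.ofList [0])) (fun x => x) false with hcutsd
  rw [pv_parts_zip (fun a c => if c ≤ MI ∨ c > MJ
        then "E:" ++ PySem.Str.slice lemma_ (some a) (some c)
        else PySem.Str.slice lemma_ (some a) (some c)) cuts [] 0]
  simp only [List.nil_append]
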